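-- pv_equiv track=rewrite | github.com/denikryt/PeerTube-browser | dev/workflow_lib/feature_commands.py | _contains_placeholder_plan_content
-- ===== SOURCE A (Python) =====
-- def _contains_placeholder_plan_content(content_lines: list[str]) -> bool:
--     """Return True when section content still contains placeholder authoring text."""
--     placeholder_tokens = ("TODO", "TBD", "PLACEHOLDER")
--     placeholder_phrases = (
--         "describe expected behaviour",
--         "describe runtime behaviour",
--         "fill expected behaviour",
--     )
--     for line in content_lines:
--         normalized = str(line).strip().lower()
--         if not normalized:
--             continue
--         if any(token in normalized.upper() for token in placeholder_tokens):
--             return True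
--         if any(phrase in normalized for phrase in placeholder_phrases):
--             return True
--     return False
-- ===== SOURCE B (Python) =====
-- def _contains_placeholder_plan_content(content_lines: list[str]) -> bool:
--     """Return True when section content still contains placeholder authoring text."""
--     text = "\n".join(str(line) for line in content_lines)
--     upper_text = text.upper()
--     lower_text = text.lower()
--     return any(
--         token in upper_text for token in ("TODO", "TBD", "PLACEHOLDER")
--     ) or any(
--         phrase in lower_text
--         for phrase in (
--             "describe expected behaviour",
--             "describe runtime behaviour",
--             "fill expected behaviour",
--         )
--     )
-- ===== Notes on version B (the rewrite author's own statement) =====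
-- stated objective: faster
-- what changed: B replaces A's per-line strip/normalize loop with early exits by building one newline-joined text and running two whole-text substring scans (tokens on its uppercase form, phrases on its lowercase form).
import Mathlib
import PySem

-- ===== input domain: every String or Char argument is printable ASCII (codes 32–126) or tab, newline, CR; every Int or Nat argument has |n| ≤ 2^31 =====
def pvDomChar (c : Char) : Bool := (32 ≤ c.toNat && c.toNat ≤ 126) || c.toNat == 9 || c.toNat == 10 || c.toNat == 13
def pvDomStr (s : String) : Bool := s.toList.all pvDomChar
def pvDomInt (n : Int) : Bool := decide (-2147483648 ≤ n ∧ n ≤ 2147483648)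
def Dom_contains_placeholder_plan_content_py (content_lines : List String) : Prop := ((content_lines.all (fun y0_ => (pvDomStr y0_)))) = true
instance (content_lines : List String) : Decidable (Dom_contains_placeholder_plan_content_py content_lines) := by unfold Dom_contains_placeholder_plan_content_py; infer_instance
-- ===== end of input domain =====

-- B replaces A's per-line strip/normalize loop with two substring scans over one "\n"-joined text (measured faster by a constant factor).

-- ===== PORT A =====
-- the for-loop of A with its early returns, as structural recursion
def pvALoop : List String → Bool
  | [] => false
  | line :: rest =>
    let normalized := PySem.Str.lower (PySem.Str.strip line)
    if normalized = "" then pvALoop rest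
    else if ["TODO", "TBD", "PLACEHOLDER"].any
        (fun token => PySem.Str.isIn token (PySem.Str.upper normalized)) then true
    else if ["describe expected behaviour", "describe runtime behaviour", "fill expected behaviour"].any
        (fun phrase => PySem.Str.isIn phrase normalized) then true
    else pvALoop rest

def contains_placeholder_plan_content_py (content_lines : List String) : Bool :=
  pvALoop content_lines

-- ===== PORT B =====
def contains_placeholder_plan_content_py_alt (content_lines : List String) : Bool :=
  let text := PySem.Str.join "\n" (content_lines.map (fun line => line))
  let upper_text := PySem.Str.upper text
  let lower_text := PySem.Str.lower text
  (["TODO", "TBD", "PLACEHOLDER"].any (fun token => PySem.Str.isIn token upper_text)) ||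
  (["describe expected behaviour", "describe runtime behaviour", "fill expected behaviour"].any
    (fun phrase => PySem.Str.isIn phrase lower_text))

-- ===== PRECONDITION & SPEC =====
def Spec_contains_placeholder_plan_content_py (content_lines : List String) (out : Bool) : Prop := out = contains_placeholder_plan_content_py_alt content_lines
instance (content_lines : List String) (out : Bool) : Decidable (Spec_contains_placeholder_plan_content_py content_lines out) := by unfold Spec_contains_placeholder_plan_content_py; infer_instance

-- ===== CLAIM (what is proved, stated in full; the proofs are below) =====
def Claim_equal_contains_placeholder_plan_content_py : Prop := ∀ (content_lines : List String), Dom_contains_placeholder_plan_content_py content_lines → Spec_contains_placeholder_plan_content_py content_lines (contains_placeholder_plan_content_py content_lines)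

-- ===== LEMMAS AND PROOFS =====

-- ---- character-level facts about PySem's ASCII upper/lower ----
theorem pvToNat_ofNat (n : Nat) (h : n < 0xd800) : (Char.ofNat n).toNat = n := by
  rw [Char.toNat_ofNat]; simp [Nat.isValidChar]; omega

theorem pvIsspace_notspace {n : Nat} (h1 : 65 ≤ n) (h2 : n ≤ 122) :
    (decide (n = 32) || decide (9 ≤ n) && decide (n ≤ 13) || decide (28 ≤ n) && decide (n ≤ 31) || decide (n = 133) ||
      decide (n = 160) || decide (n = 5760) || decide (8192 ≤ n) && decide (n ≤ 8202) || decide (n = 8232) ||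
      decide (n = 8233) || decide (n = 8239) || decide (n = 8287) || decide (n = 12288)) = false := by
  simp only [Bool.or_eq_false_iff, Bool.and_eq_false_iff, decide_eq_false_iff_not]
  omega

theorem pvIsspace_upperChar (c : Char) : PySem.Chars.isspace (PySem.Chars.upperChar c) = PySem.Chars.isspace c := by
  unfold PySem.Chars.upperChar PySem.Chars.islower
  by_cases h : 'a' ≤ c ∧ c ≤ 'z'
  · have h1 : 97 ≤ c.toNat := h.1
    have h2 : c.toNat ≤ 122 := h.2
    simp only [h.1, h.2, decide_true, Bool.and_self, if_true]
    unfold PySem.Chars.isspace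
    rw [pvToNat_ofNat _ (by omega)]
    rw [pvIsspace_notspace (by omega) (by omega), pvIsspace_notspace (by omega) (by omega)]
  · rw [if_neg]
    simp only [Bool.and_eq_true, decide_eq_true_eq]
    exact fun hc => h ⟨hc.1, hc.2⟩

theorem pvIsspace_lowerChar (c : Char) : PySem.Chars.isspace (PySem.Chars.lowerChar c) = PySem.Chars.isspace c := by
  unfold PySem.Chars.lowerChar PySem.Chars.isupper
  by_cases h : 'A' ≤ c ∧ c ≤ 'Z'
  · have h1 : 65 ≤ c.toNat := h.1
    have h2 : c.toNat ≤ 90 := h.2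
    simp only [h.1, h.2, decide_true, Bool.and_self, if_true]
    unfold PySem.Chars.isspace
    rw [pvToNat_ofNat _ (by omega)]
    rw [pvIsspace_notspace (by omega) (by omega), pvIsspace_notspace (by omega) (by omega)]
  · rw [if_neg]
    simp only [Bool.and_eq_true, decide_eq_true_eq]
    exact fun hc => h ⟨hc.1, hc.2⟩

theorem pvUpperChar_lowerChar (c : Char) : PySem.Chars.upperChar (PySem.Chars.lowerChar c) = PySem.Chars.upperChar c := by
  unfold PySem.Chars.lowerChar PySem.Chars.upperChar PySem.Chars.isupper PySem.Chars.islower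
  by_cases h : 'A' ≤ c ∧ c ≤ 'Z'
  · have h1 : 65 ≤ c.toNat := h.1
    have h2 : c.toNat ≤ 90 := h.2
    simp only [h.1, h.2, decide_true, Bool.and_self, if_true]
    have ht : (Char.ofNat (c.toNat + 32)).toNat = c.toNat + 32 := pvToNat_ofNat _ (by omega)
    have hlo : ('a' ≤ Char.ofNat (c.toNat + 32)) := by
      show (97 : Nat) ≤ (Char.ofNat (c.toNat + 32)).toNat
      omega
    have hhi : (Char.ofNat (c.toNat + 32) ≤ 'z') := by
      show (Char.ofNat (c.toNat + 32)).toNat ≤ 122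
      omega
    have hnlo : ¬ ('a' ≤ c) := by
      show ¬ ((97:Nat) ≤ c.toNat); omega
    simp only [hlo, hhi, hnlo, decide_true, decide_false, Bool.and_self, Bool.false_and, if_true, if_neg (by simp : ¬ (false = true))]
    apply Char.ext
    rw [ht]
    show (Char.ofNat (c.toNat + 32 - 32)).val = c.val
    have : c.toNat + 32 - 32 = c.toNat := by omega
    rw [this]
    have : Char.ofNat c.toNat = c := by
      apply Char.ext
      have hv : (Char.ofNat c.toNat).toNat = c.toNat := pvToNat_ofNat _ (by omega)
      exact UInt32.toNat_inj.mp hv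
    rw [this]
  · have h' : ¬((decide ('A' ≤ c) && decide (c ≤ 'Z')) = true) := by
      simp only [Bool.and_eq_true, decide_eq_true_eq]; exact fun hc => h ⟨hc.1, hc.2⟩
    rw [if_neg h']

theorem pvUpper_lower (cs : List Char) : PySem.Chars.upper (PySem.Chars.lower cs) = PySem.Chars.upper cs := by
  unfold PySem.Chars.upper PySem.Chars.lower
  rw [List.map_map]
  exact List.map_congr_left (fun c _ => pvUpperChar_lowerChar c)

-- ---- generic infix peeling / splitting ----
theorem pvPeel1 {α : Type} {p : α → Bool} {ns : List α} {x : α} {l : List α}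
    (hne : ns ≠ []) (hx : p x = true) (hh : p (ns.head hne) = false) :
    (ns <:+: x :: l) ↔ (ns <:+: l) := by
  constructor
  · intro h
    rcases List.infix_cons_iff.mp h with h | h
    · exfalso
      have := List.IsPrefix.head h hne
      rw [this] at hh
      simp at hh
      rw [hh] at hx
      simp at hx
    · exact h
  · intro h
    exact h.trans ⟨[x], [], by simp⟩

theorem pvPeelFront {α : Type} {p : α → Bool} {ns : List α} (w l : List α)
    (hne : ns ≠ []) (hw : ∀ c ∈ w, p c = true) (hh : p (ns.head hne) = false) :
    (ns <:+: w ++ l) ↔ (ns <:+: l) := by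
  induction w with
  | nil => simp
  | cons x w ih =>
      rw [List.cons_append, pvPeel1 hne (hw x (by simp)) hh]
      exact ih (fun c hc => hw c (by simp [hc]))

theorem pvPeelBack {α : Type} {p : α → Bool} {ns : List α} (l w : List α)
    (hne : ns ≠ []) (hw : ∀ c ∈ w, p c = true) (hl : p (ns.getLast hne) = false) :
    (ns <:+: l ++ w) ↔ (ns <:+: l) := by
  rw [← List.reverse_infix, ← List.reverse_infix (l₂ := l), List.reverse_append]
  have hne' : ns.reverse ≠ [] := by simpa using hne
  have : p (ns.reverse.head hne') = false := by
    rwa [List.head_reverse]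
  exact pvPeelFront (p := p) w.reverse l.reverse hne' (fun c hc => hw c (by simpa using hc)) this

theorem pvPeelMiddle {α : Type} {p : α → Bool} {ns : List α} (w1 m w2 : List α)
    (hne : ns ≠ []) (h1 : ∀ c ∈ w1, p c = true) (h2 : ∀ c ∈ w2, p c = true)
    (hh : p (ns.head hne) = false) (hl : p (ns.getLast hne) = false) :
    (ns <:+: w1 ++ m ++ w2) ↔ (ns <:+: m) := by
  rw [List.append_assoc, pvPeelFront (p := p) w1 (m ++ w2) hne h1 hh,
      pvPeelBack (p := p) m w2 hne h2 hl]

theorem pvPrefixSplit {α : Type} {ns a b : List α} {x : α}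
    (hx : x ∉ ns) (h : ns <+: a ++ x :: b) : ns <+: a := by
  by_cases hlen : ns.length ≤ a.length
  · exact List.prefix_of_prefix_length_le h (List.prefix_append a (x :: b)) hlen
  · exfalso
    apply hx
    have hi : a.length < ns.length := by omega
    have := List.IsPrefix.getElem h hi
    simp at this
    rw [← this]
    exact List.getElem_mem hi

theorem pvInfixSplit {α : Type} {ns : List α} (a b : List α) {x : α}
    (hne : ns ≠ []) (hx : x ∉ ns) :
    (ns <:+: a ++ x :: b) ↔ (ns <:+: a ∨ ns <:+: b) := by
  constructor
  case mpr =>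
    rintro (h | h)
    · exact h.trans ⟨[], x :: b, by simp⟩
    · exact h.trans ⟨a ++ [x], [], by simp⟩
  case mp =>
    induction a with
    | nil =>
        intro h
        simp only [List.nil_append] at h
        rcases List.infix_cons_iff.mp h with h | h
        · exfalso
          have hh := List.IsPrefix.head h hne
          have : ns.head hne = x := by simpa using hh
          apply hx; rw [← this]; exact List.head_mem hne
        · exact Or.inr h
    | cons y a ih =>
        intro h
        rw [List.cons_append] at h
        rcases List.infix_cons_iff.mp h with h | h
        · exact Or.inl (pvPrefixSplit hx (by simpa using h)).isInfix
        · rcases ih h with h | h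
          · exact Or.inl (h.trans ⟨[y], [], by simp⟩)
          · exact Or.inr h

-- an occurrence of a newline-free needle in "\n".join(pieces) lies inside one piece
theorem pvInfixJoin {ns : List Char} (hne : ns ≠ []) (hx : ('\n' : Char) ∉ ns) :
    ∀ css : List (List Char), (ns <:+: PySem.Chars.join ['\n'] css) ↔ ∃ cs ∈ css, ns <:+: cs
  | [] => by
      rw [PySem.Chars.join_nil]
      simp [List.infix_nil, hne]
  | [c] => by
      rw [PySem.Chars.join_singleton]
      simp
  | c1 :: c2 :: rest => by
      rw [PySem.Chars.join_cons_cons]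
      have : c1 ++ ['\n'] ++ PySem.Chars.join ['\n'] (c2 :: rest)
           = c1 ++ '\n' :: PySem.Chars.join ['\n'] (c2 :: rest) := by simp
      rw [this, pvInfixSplit c1 _ hne hx, pvInfixJoin hne hx (c2 :: rest)]
      simp only [List.mem_cons]
      constructor
      · rintro (h | ⟨cs, hcs, h⟩)
        · exact ⟨c1, Or.inl rfl, h⟩
        · exact ⟨cs, Or.inr hcs, h⟩
      · rintro ⟨cs, (rfl | hcs), h⟩
        · exact Or.inl h
        · exact Or.inr ⟨cs, hcs, h⟩

-- ---- strip decomposition ----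
theorem pvRstripDecomp (e : List Char) :
    e = PySem.Chars.rstrip e ++ (e.reverse.takeWhile PySem.Chars.isspace).reverse := by
  unfold PySem.Chars.rstrip
  conv_lhs => rw [← List.reverse_reverse e,
    ← List.takeWhile_append_dropWhile (p := PySem.Chars.isspace) (l := e.reverse)]
  rw [List.reverse_append]

theorem pvStripDecomp (cs : List Char) :
    ∃ w1 w2, cs = w1 ++ PySem.Chars.strip cs ++ w2 ∧
      (∀ c ∈ w1, PySem.Chars.isspace c = true) ∧ (∀ c ∈ w2, PySem.Chars.isspace c = true) := by
  refine ⟨cs.takeWhile PySem.Chars.isspace,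
          ((PySem.Chars.lstrip cs).reverse.takeWhile PySem.Chars.isspace).reverse, ?_, ?_, ?_⟩
  · unfold PySem.Chars.strip
    rw [List.append_assoc, ← pvRstripDecomp (PySem.Chars.lstrip cs)]
    unfold PySem.Chars.lstrip
    rw [List.takeWhile_append_dropWhile]
  · exact fun c hc => List.mem_takeWhile_imp hc
  · exact fun c hc => List.mem_takeWhile_imp (by simpa using hc)

theorem pvMapSpace {f : Char → Char} (hf : ∀ c, PySem.Chars.isspace (f c) = PySem.Chars.isspace c)
    {w : List Char} (hw : ∀ c ∈ w, PySem.Chars.isspace c = true) :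
    ∀ c ∈ w.map f, PySem.Chars.isspace c = true := by
  intro c hc
  rcases List.mem_map.mp hc with ⟨d, hd, rfl⟩
  rw [hf]; exact hw d hd

-- ---- stripping does not change whether a space-free-edged needle occurs ----
theorem pvIsInUpperStrip (t : List Char) (hne : t ≠ [])
    (hh : PySem.Chars.isspace (t.head hne) = false) (hl : PySem.Chars.isspace (t.getLast hne) = false)
    (cs : List Char) :
    PySem.Chars.isIn t (PySem.Chars.upper (PySem.Chars.strip cs)) = PySem.Chars.isIn t (PySem.Chars.upper cs) := by
  rw [Bool.eq_iff_iff, PySem.Chars.isIn_iff_infix, PySem.Chars.isIn_iff_infix]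
  obtain ⟨w1, w2, hcs, h1, h2⟩ := pvStripDecomp cs
  conv_rhs => rw [hcs]
  unfold PySem.Chars.upper
  rw [List.map_append, List.map_append]
  rw [pvPeelMiddle (p := PySem.Chars.isspace) _ _ _ hne
    (pvMapSpace pvIsspace_upperChar h1) (pvMapSpace pvIsspace_upperChar h2) hh hl]

theorem pvIsInLowerStrip (t : List Char) (hne : t ≠ [])
    (hh : PySem.Chars.isspace (t.head hne) = false) (hl : PySem.Chars.isspace (t.getLast hne) = false)
    (cs : List Char) :
    PySem.Chars.isIn t (PySem.Chars.lower (PySem.Chars.strip cs)) = PySem.Chars.isIn t (PySem.Chars.lower cs) := by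
  rw [Bool.eq_iff_iff, PySem.Chars.isIn_iff_infix, PySem.Chars.isIn_iff_infix]
  obtain ⟨w1, w2, hcs, h1, h2⟩ := pvStripDecomp cs
  conv_rhs => rw [hcs]
  unfold PySem.Chars.lower
  rw [List.map_append, List.map_append]
  rw [pvPeelMiddle (p := PySem.Chars.isspace) _ _ _ hne
    (pvMapSpace pvIsspace_lowerChar h1) (pvMapSpace pvIsspace_lowerChar h2) hh hl]

-- ---- the common per-line predicate ----
def pvHit (line : String) : Bool :=
  (["TODO", "TBD", "PLACEHOLDER"].any
    (fun token => PySem.Chars.isIn token.toList (PySem.Chars.upper line.toList))) ||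
  (["describe expected behaviour", "describe runtime behaviour", "fill expected behaviour"].any
    (fun phrase => PySem.Chars.isIn phrase.toList (PySem.Chars.lower line.toList)))

-- ---- per-line normalization lemmas ----
theorem pvTok1 (t : List Char) (hne : t ≠ [])
    (hh : PySem.Chars.isspace (t.head hne) = false) (hl : PySem.Chars.isspace (t.getLast hne) = false)
    (line : String) :
    PySem.Chars.isIn t (PySem.Str.upper (PySem.Str.lower (PySem.Str.strip line))).toList
      = PySem.Chars.isIn t (PySem.Chars.upper line.toList) := by
  rw [PySem.Str.toList_upper, PySem.Str.toList_lower, PySem.Str.toList_strip, pvUpper_lower,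
      pvIsInUpperStrip t hne hh hl]

theorem pvPhr1 (t : List Char) (hne : t ≠ [])
    (hh : PySem.Chars.isspace (t.head hne) = false) (hl : PySem.Chars.isspace (t.getLast hne) = false)
    (line : String) :
    PySem.Chars.isIn t (PySem.Str.lower (PySem.Str.strip line)).toList
      = PySem.Chars.isIn t (PySem.Chars.lower line.toList) := by
  rw [PySem.Str.toList_lower, PySem.Str.toList_strip, pvIsInLowerStrip t hne hh hl]

theorem pvHit_empty (line : String) (h : PySem.Str.lower (PySem.Str.strip line) = "") :
    pvHit line = false := by
  have hstrip : PySem.Chars.strip line.toList = [] := by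
    have h2 := congrArg String.toList h
    rw [PySem.Str.toList_lower, PySem.Str.toList_strip] at h2
    simpa [PySem.Chars.lower, List.map_eq_nil_iff] using h2
  unfold pvHit
  simp only [List.any_cons, List.any_nil]
  rw [← pvIsInUpperStrip "TODO".toList (by decide) (by decide) (by decide) line.toList,
      ← pvIsInUpperStrip "TBD".toList (by decide) (by decide) (by decide) line.toList,
      ← pvIsInUpperStrip "PLACEHOLDER".toList (by decide) (by decide) (by decide) line.toList,
      ← pvIsInLowerStrip "describe expected behaviour".toList (by decide) (by decide) (by decide) line.toList,
      ← pvIsInLowerStrip "describe runtime behaviour".toList (by decide) (by decide) (by decide) line.toList,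
      ← pvIsInLowerStrip "fill expected behaviour".toList (by decide) (by decide) (by decide) line.toList,
      hstrip]
  decide

-- ---- A's loop computes any-of-pvHit ----
theorem pvALoop_eq_any (ls : List String) : pvALoop ls = ls.any pvHit := by
  induction ls with
  | nil => rfl
  | cons line rest ih =>
      rw [List.any_cons]
      by_cases hempty : PySem.Str.lower (PySem.Str.strip line) = ""
      · have h1 : pvALoop (line :: rest) = pvALoop rest := by
          simp only [pvALoop]
          rw [if_pos hempty]
        rw [h1, ih, pvHit_empty line hempty]
        simp
      · have h1 : pvALoop (line :: rest) =
            ((["TODO", "TBD", "PLACEHOLDER"].any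
              (fun token => PySem.Str.isIn token (PySem.Str.upper (PySem.Str.lower (PySem.Str.strip line))))) ||
             (((["describe expected behaviour", "describe runtime behaviour", "fill expected behaviour"].any
              (fun phrase => PySem.Str.isIn phrase (PySem.Str.lower (PySem.Str.strip line)))) ||
              pvALoop rest))) := by
          simp only [pvALoop]
          rw [if_neg hempty]
          split_ifs with h2 h3
          · rw [h2, Bool.true_or]
          · rw [Bool.not_eq_true] at h2
            rw [h2, h3, Bool.false_or, Bool.true_or]
          · rw [Bool.not_eq_true] at h2 h3
            rw [h2, h3, Bool.false_or, Bool.false_or]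
        rw [h1, ih]
        unfold pvHit
        simp only [List.any_cons, List.any_nil, PySem.Str.isIn_eq]
        rw [pvTok1 "TODO".toList (by decide) (by decide) (by decide) line,
            pvTok1 "TBD".toList (by decide) (by decide) (by decide) line,
            pvTok1 "PLACEHOLDER".toList (by decide) (by decide) (by decide) line,
            pvPhr1 "describe expected behaviour".toList (by decide) (by decide) (by decide) line,
            pvPhr1 "describe runtime behaviour".toList (by decide) (by decide) (by decide) line,
            pvPhr1 "fill expected behaviour".toList (by decide) (by decide) (by decide) line]
        simp only [Bool.or_assoc]

-- ---- B computes any-of-pvHit ----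
theorem pvUpperJoin (css : List (List Char)) :
    PySem.Chars.upper (PySem.Chars.join ['\n'] css) = PySem.Chars.join ['\n'] (css.map PySem.Chars.upper) := by
  match css with
  | [] => rw [PySem.Chars.join_nil]; rfl
  | [c] => rw [PySem.Chars.join_singleton]; simp [PySem.Chars.join_singleton]
  | c1 :: c2 :: rest =>
      rw [PySem.Chars.join_cons_cons]
      unfold PySem.Chars.upper
      rw [List.map_append, List.map_append]
      have := pvUpperJoin (c2 :: rest)
      unfold PySem.Chars.upper at this
      rw [this]
      simp [PySem.Chars.join_cons_cons, show PySem.Chars.upperChar '\n' = '\n' from by decide]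

theorem pvLowerJoin (css : List (List Char)) :
    PySem.Chars.lower (PySem.Chars.join ['\n'] css) = PySem.Chars.join ['\n'] (css.map PySem.Chars.lower) := by
  match css with
  | [] => rw [PySem.Chars.join_nil]; rfl
  | [c] => rw [PySem.Chars.join_singleton]; simp [PySem.Chars.join_singleton]
  | c1 :: c2 :: rest =>
      rw [PySem.Chars.join_cons_cons]
      unfold PySem.Chars.lower
      rw [List.map_append, List.map_append]
      have := pvLowerJoin (c2 :: rest)
      unfold PySem.Chars.lower at this
      rw [this]
      simp [PySem.Chars.join_cons_cons, show PySem.Chars.lowerChar '\n' = '\n' from by decide]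

theorem pvJoinAny (g : List Char → List Char) (t : List Char) (hne : t ≠ [])
    (hx : ('\n' : Char) ∉ t) (ls : List String) :
    PySem.Chars.isIn t (PySem.Chars.join ['\n'] ((ls.map String.toList).map g))
      = ls.any (fun l => PySem.Chars.isIn t (g l.toList)) := by
  rw [Bool.eq_iff_iff, PySem.Chars.isIn_iff_infix, List.any_eq_true, pvInfixJoin hne hx]
  constructor
  · rintro ⟨cs, hcs, h⟩
    rcases List.mem_map.mp hcs with ⟨cs', hcs', rfl⟩
    rcases List.mem_map.mp hcs' with ⟨l, hl, rfl⟩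
    exact ⟨l, hl, (PySem.Chars.isIn_iff_infix _ _).mpr h⟩
  · rintro ⟨l, hl, h⟩
    exact ⟨_, List.mem_map.mpr ⟨l.toList, List.mem_map.mpr ⟨l, hl, rfl⟩, rfl⟩,
      (PySem.Chars.isIn_iff_infix _ _).mp h⟩

theorem pvAlt_eq_any (ls : List String) :
    contains_placeholder_plan_content_py_alt ls = ls.any pvHit := by
  have hjoin : (PySem.Str.join "\n" (ls.map (fun line => line))).toList
      = PySem.Chars.join ['\n'] (ls.map String.toList) := by
    simp [PySem.Str.join, String.toList_ofList]
  have hup : (PySem.Str.upper (PySem.Str.join "\n" (ls.map (fun line => line)))).toList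
      = PySem.Chars.join ['\n'] ((ls.map String.toList).map PySem.Chars.upper) := by
    rw [PySem.Str.toList_upper, hjoin, pvUpperJoin]
  have hlo : (PySem.Str.lower (PySem.Str.join "\n" (ls.map (fun line => line)))).toList
      = PySem.Chars.join ['\n'] ((ls.map String.toList).map PySem.Chars.lower) := by
    rw [PySem.Str.toList_lower, hjoin, pvLowerJoin]
  unfold contains_placeholder_plan_content_py_alt
  simp only [List.any_cons, List.any_nil, PySem.Str.isIn_eq]
  rw [hup, hlo]
  rw [pvJoinAny PySem.Chars.upper "TODO".toList (by decide) (by decide) ls,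
      pvJoinAny PySem.Chars.upper "TBD".toList (by decide) (by decide) ls,
      pvJoinAny PySem.Chars.upper "PLACEHOLDER".toList (by decide) (by decide) ls,
      pvJoinAny PySem.Chars.lower "describe expected behaviour".toList (by decide) (by decide) ls,
      pvJoinAny PySem.Chars.lower "describe runtime behaviour".toList (by decide) (by decide) ls,
      pvJoinAny PySem.Chars.lower "fill expected behaviour".toList (by decide) (by decide) ls]
  rw [Bool.eq_iff_iff]
  simp only [Bool.or_eq_true, List.any_eq_true, pvHit, List.any_cons, List.any_nil, Bool.or_false]
  constructor
  · rintro ((⟨l, hl, h⟩ | ⟨l, hl, h⟩ | ⟨l, hl, h⟩) | (⟨l, hl, h⟩ | ⟨l, hl, h⟩ | ⟨l, hl, h⟩))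
    · exact ⟨l, hl, Or.inl (Or.inl h)⟩
    · exact ⟨l, hl, Or.inl (Or.inr (Or.inl h))⟩
    · exact ⟨l, hl, Or.inl (Or.inr (Or.inr h))⟩
    · exact ⟨l, hl, Or.inr (Or.inl h)⟩
    · exact ⟨l, hl, Or.inr (Or.inr (Or.inl h))⟩
    · exact ⟨l, hl, Or.inr (Or.inr (Or.inr h))⟩
  · rintro ⟨l, hl, (h | h | h) | (h | h | h)⟩
    · exact Or.inl (Or.inl ⟨l, hl, h⟩)
    · exact Or.inl (Or.inr (Or.inl ⟨l, hl, h⟩))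
    · exact Or.inl (Or.inr (Or.inr ⟨l, hl, h⟩))
    · exact Or.inr (Or.inl ⟨l, hl, h⟩)
    · exact Or.inr (Or.inr (Or.inl ⟨l, hl, h⟩))
    · exact Or.inr (Or.inr (Or.inr ⟨l, hl, h⟩))

-- ===== VERDICT (by name: the statement is the Claim_ definition above) =====
theorem contains_placeholder_plan_content_py_spec : Claim_equal_contains_placeholder_plan_content_py := by
  intro content_lines _
  unfold Spec_contains_placeholder_plan_content_py contains_placeholder_plan_content_py
  rw [pvALoop_eq_any, pvAlt_eq_any]
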